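-- pv_equiv track=rewrite | github.com/Crossroadsman/treehouse-techdegree-python-project2 | adfgvx.py | _unsorter
-- ===== SOURCE A (Python) =====
-- def _unsorter(keyphrase, sorted):
--     '''takes a keyphrase of unique values and a list of lists where
--     each inner list has a sorted character from keyphrase as the first
--     element.
--     Returns a new list of lists where each inner list is in the order
--     of the keyphrase
--     '''
--     unsorted = []
--     for letter in keyphrase:
--         for i in range(len(sorted)):
--             if sorted[i][0].lower() == letter.lower():
--                 unsorted.append(sorted[i])
--                 del sorted[i]
--                 break
--     return unsorted
-- ===== SOURCE B (Python) =====
-- def _unsorter(keyphrase, sorted):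
--     # Inverted traversal: one pass over `sorted` filling a keyphrase-position
--     # slot table (each sublist goes to the earliest still-empty matching
--     # position), then compact; matched sublists are deleted from `sorted`
--     # in place, like the original.
--     letters = [ch.lower() for ch in keyphrase]
--     slots = [None] * len(letters)
--     taken = []
--     for i, sub in enumerate(sorted):
--         k = sub[0].lower()
--         p = next((j for j, ch in enumerate(letters)
--                   if ch == k and slots[j] is None), None)
--         if p is not None:
--             slots[p] = sub
--             taken.append(i)
--     for i in reversed(taken):
--         del sorted[i]
--     return [s for s in slots if s is not None]
-- ===== Notes on version B (the rewrite author's own statement) =====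
-- stated objective: alternative
-- what changed: Inverts the traversal: instead of scanning and mutating `sorted` once per keyphrase letter, B makes a single pass over `sorted`, placing each sublist into the earliest still-empty keyphrase-position slot with a matching letter, then compacts the slot table (and deletes the matched indices to reproduce the in-place mutation); one pass over the data plus a single batched deletion avoids A's repeated rescans and O(n) `del` shifts.
-- outside the precondition, e.g. on _unsorter('a', [['a'], []]): A returns [['a']], B raises IndexError; on _unsorter('', [[]]): A returns [], B raises IndexError
import Mathlib
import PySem

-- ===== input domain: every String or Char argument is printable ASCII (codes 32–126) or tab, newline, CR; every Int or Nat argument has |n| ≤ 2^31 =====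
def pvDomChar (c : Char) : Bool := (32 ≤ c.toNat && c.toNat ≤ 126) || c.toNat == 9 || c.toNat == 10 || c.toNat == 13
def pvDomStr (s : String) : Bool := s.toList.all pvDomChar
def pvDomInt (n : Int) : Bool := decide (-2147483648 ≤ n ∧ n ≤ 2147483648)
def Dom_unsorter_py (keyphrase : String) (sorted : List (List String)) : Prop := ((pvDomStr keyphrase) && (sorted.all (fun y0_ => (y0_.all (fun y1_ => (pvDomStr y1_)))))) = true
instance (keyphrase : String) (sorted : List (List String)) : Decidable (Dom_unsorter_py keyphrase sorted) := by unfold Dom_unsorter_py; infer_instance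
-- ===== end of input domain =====

-- B replaces the per-letter scan-and-delete over `sorted` with a single pass over `sorted`
-- into a keyphrase-position slot table (objective: alternative decomposition, same cost).
-- Both A and B mutate the Python argument `sorted` identically (matched sublists removed);
-- the equivalence proved here is about the return value.

-- ===== PORT A =====
-- inner loop `for i in range(len(sorted)): if sorted[i][0].lower()==target: append/del/break`:
-- returns the first sublist whose lowered first element equals target, plus the list with it deleted.
-- (`sub.headD ""` stands for sub[0]; Pre_ guarantees every sublist is nonempty, so the default is never used.)
def pvScan (target : String) : List (List String) → Option (List String × List (List String))
  | [] => none
  | s :: rest =>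
    if PySem.Str.lower (s.headD "") = target then some (s, rest)
    else match pvScan target rest with
      | some (m, r) => some (m, s :: r)
      | none => none

-- outer loop `for letter in keyphrase`, accumulating `unsorted`
def pvALoop : List Char → List (List String) → List (List String) → List (List String)
  | [], _, acc => acc
  | c :: ks, ss, acc =>
    match pvScan (PySem.Str.lower (String.ofList [c])) ss with
    | some (m, ss') => pvALoop ks ss' (acc ++ [m])
    | none => pvALoop ks ss acc

def unsorter_py (keyphrase : String) (sorted : List (List String)) : List (List String) :=
  pvALoop keyphrase.toList sorted []

-- ===== PORT B =====
-- `p = next((j for j, ch in enumerate(letters) if ch == k and slots[j] is None), None); slots[p] = sub`: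
-- set the earliest slot whose letter matches k and which is still empty (walk letters and slots in parallel).
def pvFill (k : String) (sub : List String) : List String → List (Option (List String)) → List (Option (List String))
  | c :: ls, o :: t => if c = k ∧ o = none then some sub :: t else o :: pvFill k sub ls t
  | _, slots => slots

-- one iteration of `for i, sub in enumerate(sorted)` (the `taken` bookkeeping only drives the
-- in-place deletion from `sorted`, which has no effect on the return value, so it is not ported)
def pvBStep (letters : List String) (slots : List (Option (List String))) (sub : List String) : List (Option (List String)) :=
  pvFill (PySem.Str.lower (sub.headD "")) sub letters slots

def unsorter_py_alt (keyphrase : String) (sorted : List (List String)) : List (List String) :=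
  let letters := keyphrase.toList.map (fun c => PySem.Str.lower (String.ofList [c]))
  ((sorted.foldl (pvBStep letters) (List.replicate letters.length none)).filterMap id)

-- ===== PRECONDITION & SPEC =====
-- Pre_ excludes inputs containing an empty sublist: on those Python A raises IndexError at
-- sorted[i][0] whenever the scan reaches the empty sublist, and B raises IndexError at sub[0]
-- in its single pass (A happens to return on the few such inputs whose empty sublists are
-- never scanned — see the cites).
def Pre_unsorter_py (keyphrase : String) (sorted : List (List String)) : Prop :=
  ∀ sub ∈ sorted, sub ≠ []
instance (keyphrase : String) (sorted : List (List String)) : Decidable (Pre_unsorter_py keyphrase sorted) := by unfold Pre_unsorter_py; infer_instance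

def pvWitness_unsorter_py : String × List (List String) :=
  ("ba", [["a", "1"], ["b", "2"]])

def Spec_unsorter_py (keyphrase : String) (sorted : List (List String)) (out : List (List String)) : Prop := out = unsorter_py_alt keyphrase sorted
instance (keyphrase : String) (sorted : List (List String)) (out : List (List String)) : Decidable (Spec_unsorter_py keyphrase sorted out) := by unfold Spec_unsorter_py; infer_instance

-- ===== CLAIM (what is proved, stated in full; the proofs are below) =====
def Claim_equal_unsorter_py : Prop := ∀ (keyphrase : String) (sorted : List (List String)), Dom_unsorter_py keyphrase sorted → Pre_unsorter_py keyphrase sorted → Spec_unsorter_py keyphrase sorted (unsorter_py keyphrase sorted)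

-- ===== LEMMAS AND PROOFS =====

theorem pvALoop_acc (ks : List Char) :
    ∀ (ss : List (List String)) (acc : List (List String)),
      pvALoop ks ss acc = acc ++ pvALoop ks ss [] := by
  induction ks with
  | nil => intro ss acc; simp [pvALoop]
  | cons c ks ih =>
    intro ss acc
    simp only [pvALoop]
    cases h : pvScan (PySem.Str.lower (String.ofList [c])) ss with
    | none => exact ih ss acc
    | some p =>
      obtain ⟨m, ss'⟩ := p
      dsimp only
      rw [ih ss' (acc ++ [m]), List.nil_append, ih ss' [m]]
      simp

-- a filled slot is never overwritten; the tail evolves independently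
theorem pvFold_some (ls : List String) (s₀ : List String) :
    ∀ (ss : List (List String)) (c : String) (t : List (Option (List String))),
      ss.foldl (pvBStep (c :: ls)) (some s₀ :: t)
        = some s₀ :: ss.foldl (pvBStep ls) t := by
  intro ss
  induction ss with
  | nil => intro c t; simp
  | cons s rest ih =>
    intro c t
    simp only [List.foldl_cons]
    rw [show pvBStep (c :: ls) (some s₀ :: t) s
          = some s₀ :: pvBStep ls t s by simp [pvBStep, pvFill]]
    exact ih c _

-- the head slot of the fold is the first sublist matching c, and the tail fold runs on the rest
theorem pvFold_none (ls : List String) :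
    ∀ (ss : List (List String)) (c : String) (t : List (Option (List String))),
      ss.foldl (pvBStep (c :: ls)) (none :: t)
        = match pvScan c ss with
          | some (m, ss') => some m :: ss'.foldl (pvBStep ls) t
          | none => none :: ss.foldl (pvBStep ls) t := by
  intro ss
  induction ss with
  | nil => intro c t; simp [pvScan]
  | cons s rest ih =>
    intro c t
    simp only [List.foldl_cons]
    by_cases hk : PySem.Str.lower (s.headD "") = c
    · rw [show pvBStep (c :: ls) (none :: t) s = some s :: t by
        simp only [pvBStep, pvFill]
        rw [if_pos ⟨hk.symm, trivial⟩]]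
      rw [pvFold_some]
      simp only [pvScan]
      rw [if_pos hk]
    · rw [show pvBStep (c :: ls) (none :: t) s = none :: pvBStep ls t s by
        simp only [pvBStep, pvFill]
        rw [if_neg]
        rintro ⟨h, -⟩; exact hk h.symm]
      rw [ih c (pvBStep ls t s)]
      simp only [pvScan, if_neg hk]
      cases h : pvScan c rest with
      | none => simp
      | some p => simp

theorem pvMain (ks : List Char) :
    ∀ (ss : List (List String)),
      ((ss.foldl (pvBStep (ks.map (fun c => PySem.Str.lower (String.ofList [c]))))
          (List.replicate (ks.map (fun c => PySem.Str.lower (String.ofList [c]))).length none)).filterMap id)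
        = pvALoop ks ss [] := by
  induction ks with
  | nil =>
    intro ss
    have h : ∀ (ss' : List (List String)),
        ss'.foldl (pvBStep []) ([] : List (Option (List String))) = [] := by
      intro ss'; induction ss' with
      | nil => rfl
      | cons s rest ih => simpa [pvBStep, pvFill] using ih
    simp [pvALoop, h ss]
  | cons c ks ih =>
    intro ss
    simp only [List.map_cons, List.length_cons, List.replicate_succ]
    rw [pvFold_none]
    simp only [pvALoop]
    cases h : pvScan (PySem.Str.lower (String.ofList [c])) ss with
    | none => simpa using ih ss
    | some p =>
      obtain ⟨m, ss'⟩ := p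
      dsimp only
      rw [List.nil_append, pvALoop_acc ks ss' [m]]
      simpa using ih ss'


-- ===== VERDICT (by name: the statement is the Claim_ definition above) =====
theorem unsorter_py_spec : Claim_equal_unsorter_py := by
  intro keyphrase sorted _ _
  unfold Spec_unsorter_py unsorter_py unsorter_py_alt
  exact (pvMain keyphrase.toList sorted).symm
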